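-- pv_equiv track=rewrite | github.com/smolk19841984-design/lara | iPad8,9_Analysis/scripts/binary_diff_full.py | diff_bytes
-- ===== SOURCE A (Python) =====
-- def diff_bytes(a,b,base=0):
--     diffs = []
--     i = 0
--     n = min(len(a), len(b))
--     cur = None
--     while i < n:
--         if a[i] != b[i]:
--             if cur is None:
--                 cur = [i, i+1]
--             else:
--                 cur[1] = i+1
--         else:
--             if cur is not None:
--                 diffs.append((base+cur[0], base+cur[1]))
--                 cur = None
--         i += 1
--     if cur is not None:
--         diffs.append((base+cur[0], base+cur[1]))
--     # if lengths differ, record trailing range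
--     if len(a) != len(b):
--         diffs.append((base+n, base+max(len(a), len(b))))
--     return diffs
-- ===== SOURCE B (Python) =====
-- def diff_bytes(a, b, base=0):
--     n = min(len(a), len(b))
--     # pass 1: collect differing indices
--     idx = [i for i in range(n) if a[i] != b[i]]
--     # pass 2: coalesce consecutive indices into [start, end) runs
--     runs = []
--     for i in idx:
--         if runs and runs[-1][1] == i:
--             runs[-1][1] = i + 1
--         else:
--             runs.append([i, i + 1])
--     out = [(base + s, base + e) for s, e in runs]
--     if len(a) != len(b):
--         out.append((base + n, base + max(len(a), len(b))))
--     return out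
-- ===== Notes on version B (the rewrite author's own statement) =====
-- stated objective: alternative
-- what changed: Replaces A's single stateful while-loop (carrying a mutable 'cur' run plus end-of-loop flush) with two passes: collect the differing indices by comprehension, then coalesce consecutive indices into runs, applying base only when emitting.
import Mathlib
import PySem

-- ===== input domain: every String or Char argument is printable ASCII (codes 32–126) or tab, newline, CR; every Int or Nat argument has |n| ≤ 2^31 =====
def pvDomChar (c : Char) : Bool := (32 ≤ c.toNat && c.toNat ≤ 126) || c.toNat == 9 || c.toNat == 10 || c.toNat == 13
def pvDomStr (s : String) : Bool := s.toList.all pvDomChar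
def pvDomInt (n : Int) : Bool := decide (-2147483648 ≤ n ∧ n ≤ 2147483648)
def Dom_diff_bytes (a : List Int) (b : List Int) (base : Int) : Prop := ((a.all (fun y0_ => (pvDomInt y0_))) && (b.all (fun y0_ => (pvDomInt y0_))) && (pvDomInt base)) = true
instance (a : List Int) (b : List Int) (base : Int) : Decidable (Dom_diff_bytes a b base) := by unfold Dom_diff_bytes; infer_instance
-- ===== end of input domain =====

-- B replaces A's single stateful while-loop with two passes (collect differing indices, then coalesce runs); alternative decomposition, same cost.


-- ===== PORT A =====
-- loop body of A's while-loop: state = (diffs so far, current open run as Option (start, end))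
def stepA (a b : List Int) (base : Int)
    (st : List (Int × Int) × Option (Int × Int)) (i : Nat) :
    List (Int × Int) × Option (Int × Int) :=
  if a.getD i 0 ≠ b.getD i 0 then
    match st.2 with
    | none => (st.1, some ((i : Int), (i : Int) + 1))
    | some c => (st.1, some (c.1, (i : Int) + 1))
  else
    match st.2 with
    | some c => (st.1 ++ [(base + c.1, base + c.2)], none)
    | none => st

def diff_bytes (a : List Int) (b : List Int) (base : Int) : List (Int × Int) :=
  let n := min a.length b.length
  let st := (List.range n).foldl (stepA a b base) ([], none)
  let diffs :=
    match st.2 with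
    | some c => st.1 ++ [(base + c.1, base + c.2)]
    | none => st.1
  if a.length ≠ b.length then
    diffs ++ [(base + (n : Int), base + ((max a.length b.length : Nat) : Int))]
  else diffs

-- ===== PORT B =====
-- coalescing step of B's second pass: extend the last run if it ends at i, else open a new run
def stepB (ds : List (Int × Int)) (i : Nat) : List (Int × Int) :=
  match ds.getLast? with
  | some l => if l.2 = (i : Int) then ds.dropLast ++ [(l.1, (i : Int) + 1)]
              else ds ++ [((i : Int), (i : Int) + 1)]
  | none => [((i : Int), (i : Int) + 1)]

def diff_bytes_alt (a : List Int) (b : List Int) (base : Int) : List (Int × Int) :=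
  let n := min a.length b.length
  let idx := (List.range n).filter (fun i => a.getD i 0 ≠ b.getD i 0)
  let runs := idx.foldl stepB []
  let out := runs.map (fun p => (base + p.1, base + p.2))
  if a.length ≠ b.length then
    out ++ [(base + (n : Int), base + ((max a.length b.length : Nat) : Int))]
  else out

-- ===== PRECONDITION & SPEC =====
def Spec_diff_bytes (a : List Int) (b : List Int) (base : Int) (out : List (Int × Int)) : Prop := out = diff_bytes_alt a b base
instance (a : List Int) (b : List Int) (base : Int) (out : List (Int × Int)) : Decidable (Spec_diff_bytes a b base out) := by unfold Spec_diff_bytes; infer_instance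

-- ===== CLAIM (what is proved, stated in full; the proofs are below) =====
def Claim_equal_diff_bytes : Prop := ∀ (a : List Int) (b : List Int) (base : Int), Dom_diff_bytes a b base → Spec_diff_bytes a b base (diff_bytes a b base)

-- ===== LEMMAS AND PROOFS =====

-- invariant linking A's loop state after k iterations to B's runs over the filtered prefix
def RunInv (base : Int) (k : Nat)
    (st : List (Int × Int) × Option (Int × Int)) (runs : List (Int × Int)) : Prop :=
  match st.2 with
  | none => st.1 = runs.map (fun p => (base + p.1, base + p.2)) ∧
      (∀ s e : Int, runs.getLast? = some (s, e) → e < (k : Int))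
  | some c => c.2 = (k : Int) ∧
      ∃ pre, runs = pre ++ [(c.1, (k : Int))] ∧
        st.1 = pre.map (fun p => (base + p.1, base + p.2))

theorem inv_step (a b : List Int) (base : Int) (k : Nat)
    (st : List (Int × Int) × Option (Int × Int)) (runs : List (Int × Int))
    (h : RunInv base k st runs) :
    RunInv base (k + 1) (stepA a b base st k)
      ((if a.getD k 0 ≠ b.getD k 0 then [k] else []).foldl stepB runs) := by
  by_cases hd : a.getD k 0 ≠ b.getD k 0
  · simp only [if_pos hd, List.foldl_cons, List.foldl_nil]
    match hst : st.2 with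
    | none =>
      obtain ⟨h1, h2⟩ := by simpa [RunInv, hst] using h
      have hlast : ∀ l ∈ runs.getLast?, ¬ l.2 = (k : Int) := by
        intro l hl he
        have := h2 l.1 l.2 (by simpa using hl)
        omega
      unfold stepA stepB RunInv
      simp only [if_pos hd, hst]
      cases hr : runs.getLast? with
      | none =>
        have : runs = [] := List.getLast?_eq_none_iff.mp hr
        subst this
        refine ⟨by push_cast; ring, [], by simp, by simpa using h1⟩
      | some l =>
        simp only [if_neg (hlast l (by rw [hr]; exact Option.mem_some_iff.mpr rfl))]
        exact ⟨by push_cast; ring, runs, rfl, h1⟩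
    | some c =>
      obtain ⟨h1, pre, h2, h3⟩ := by simpa [RunInv, hst] using h
      unfold stepA stepB RunInv
      simp only [if_pos hd, hst]
      have hr : runs.getLast? = some (c.1, (k : Int)) := by
        rw [h2]; simp
      rw [hr]
      simp only [if_true]
      refine ⟨by push_cast; ring, pre, ?_, h3⟩
      rw [h2, List.dropLast_concat]
      push_cast; ring_nf
  · simp only [if_neg hd, List.foldl_nil]
    match hst : st.2 with
    | none =>
      obtain ⟨h1, h2⟩ := by simpa [RunInv, hst] using h
      unfold stepA RunInv
      simp only [if_neg hd, hst]
      refine ⟨h1, fun s e hse => by have := h2 s e hse; omega⟩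
    | some c =>
      obtain ⟨h1, pre, h2, h3⟩ := by simpa [RunInv, hst] using h
      unfold stepA RunInv
      simp only [if_neg hd, hst]
      constructor
      · rw [h2, h3, List.map_append]
        simp [h1]
      · intro s e hse
        rw [h2] at hse
        simp at hse
        omega

theorem inv_all (a b : List Int) (base : Int) (k : Nat) :
    RunInv base k ((List.range k).foldl (stepA a b base) ([], none))
      (((List.range k).filter (fun i => a.getD i 0 ≠ b.getD i 0)).foldl stepB []) := by
  induction k with
  | zero => simp [RunInv]
  | succ k ih =>
    rw [List.range_succ, List.foldl_append, List.filter_append, List.foldl_append]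
    have h := inv_step a b base k _ _ ih
    by_cases hd : a.getD k 0 ≠ b.getD k 0
    · simpa [List.filter_cons, hd] using h
    · simpa [List.filter_cons, hd] using h

theorem core_eq (a b : List Int) (base : Int) :
    (let st := (List.range (min a.length b.length)).foldl (stepA a b base) ([], none)
     match st.2 with
     | some c => st.1 ++ [(base + c.1, base + c.2)]
     | none => st.1) =
    (((List.range (min a.length b.length)).filter
        (fun i => a.getD i 0 ≠ b.getD i 0)).foldl stepB []).map
      (fun p => (base + p.1, base + p.2)) := by
  have h := inv_all a b base (min a.length b.length)
  set st := (List.range (min a.length b.length)).foldl (stepA a b base) ([], none) with hst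
  set runs := ((List.range (min a.length b.length)).filter
      (fun i => a.getD i 0 ≠ b.getD i 0)).foldl stepB [] with hruns
  match hc : st.2 with
  | none =>
    obtain ⟨h1, _⟩ := by simpa [RunInv, hc] using h
    simpa [hc] using h1
  | some c =>
    obtain ⟨h1, pre, h2, h3⟩ := by simpa [RunInv, hc] using h
    simp only [hc]
    rw [h2, List.map_append, h3]
    simp [h1]

-- ===== VERDICT (by name: the statement is the Claim_ definition above) =====
theorem diff_bytes_spec : Claim_equal_diff_bytes := by
  intro a b base _
  unfold Spec_diff_bytes diff_bytes diff_bytes_alt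
  have := core_eq a b base
  simp only at this ⊢
  rw [this]
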